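-- pv_equiv track=rewrite | github.com/senianh/Praktikum_Kriptografi | Hill Cipher/hillCipher.py | find_key_bruteforce
-- ===== SOURCE A (Python) =====
-- def char_to_num(c):
--     return ord(c.upper()) - ord('A')
--
-- def text_to_nums(text):
--     return [char_to_num(c) for c in text.upper() if c.isalpha()]
--
-- def mat_mult_vec(A, v):
--     n = len(A)
--     result = [0]*n
--     for i in range(n):
--         for j in range(n):
--             result[i] += A[i][j] * v[j]
--         result[i] %= 26
--     return result
--
-- def find_key_bruteforce(plaintext, ciphertext, n=2):
--     pt_nums = text_to_nums(plaintext)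
--     ct_nums = text_to_nums(ciphertext)
--
--     P_blocks = [pt_nums[i:i+n] for i in range(0, len(pt_nums), n)]
--     C_blocks = [ct_nums[i:i+n] for i in range(0, len(ct_nums), n)]
--
--     for a in range(26):
--         for b in range(26):
--             for c in range(26):
--                 for d in range(26):
--                     key = [[a,b],[c,d]]
--                     valid = True
--                     for p, ciph in zip(P_blocks, C_blocks):
--                         enc = mat_mult_vec(key, p)
--                         if [x%26 for x in enc] != [y%26 for y in ciph]:
--                             valid = False
--                             break
--                     if valid:
--                         return key
--     return None
-- ===== SOURCE B (Python) =====
-- def find_key_bruteforce(plaintext, ciphertext, n=2):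
--     # Search each 2x2 key row independently (26^2 candidates per row) instead of
--     # enumerating all 26^4 keys: row i of the key only affects entry i of each
--     # encrypted block, so the lexicographically first key found by a full scan is
--     # [first valid row 0, first valid row 1].
--     pt_nums = [ord(ch.upper()) - 65 for ch in plaintext.upper() if ch.isalpha()]
--     ct_nums = [ord(ch.upper()) - 65 for ch in ciphertext.upper() if ch.isalpha()]
--     pairs = list(zip([pt_nums[i:i+n] for i in range(0, len(pt_nums), n)],
--                      [ct_nums[i:i+n] for i in range(0, len(ct_nums), n)]))
--
--     def find_row(r):
--         for a in range(26):
--             for b in range(26):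
--                 if all(len(c) == 2 and (a * p[0] + b * p[1]) % 26 == c[r] % 26
--                        for p, c in pairs):
--                     return [a, b]
--         return None
--
--     row0 = find_row(0)
--     if row0 is None:
--         return None
--     row1 = find_row(1)
--     if row1 is None:
--         return None
--     return [row0, row1]
-- ===== Notes on version B (the rewrite author's own statement) =====
-- stated objective: faster
-- what changed: Instead of enumerating all 26^4 candidate 2x2 keys and validating whole blocks, B searches the two key rows independently (26^2 candidates each, each row only determines one entry of every encrypted block) and combines the lexicographically first valid row 0 with the first valid row 1.
-- outside the precondition, e.g. on find_key_bruteforce('aaa', 'bbb', 2): A returns None, B returns None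
import Mathlib
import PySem

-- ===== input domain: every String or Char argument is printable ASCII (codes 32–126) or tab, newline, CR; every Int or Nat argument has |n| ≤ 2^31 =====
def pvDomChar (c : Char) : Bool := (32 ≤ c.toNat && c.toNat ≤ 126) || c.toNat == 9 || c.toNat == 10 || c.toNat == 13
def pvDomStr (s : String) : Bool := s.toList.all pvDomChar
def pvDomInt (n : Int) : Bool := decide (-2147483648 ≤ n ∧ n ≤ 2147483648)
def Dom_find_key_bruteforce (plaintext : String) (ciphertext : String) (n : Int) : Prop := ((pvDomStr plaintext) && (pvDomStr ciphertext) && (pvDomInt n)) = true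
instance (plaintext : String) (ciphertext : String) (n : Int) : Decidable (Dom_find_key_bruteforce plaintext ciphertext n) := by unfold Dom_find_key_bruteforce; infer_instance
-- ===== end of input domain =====

-- B replaces A's scan of all 26^4 candidate 2x2 keys by two independent scans of
-- 26^2 candidate rows (row i of the key determines entry i of every encrypted block).

-- ===== PORT A =====

-- ord(c.upper()) - ord('A')  (c.upper() = upperChar on the ASCII domain)
def charToNum (c : Char) : Int := ((PySem.Chars.upperChar c).toNat : Int) - 65

-- [char_to_num(c) for c in text.upper() if c.isalpha()]
def textToNums (text : String) : List Int :=
  (((PySem.Str.upper text).toList.filter (fun c => PySem.Chars.isalpha c)).map charToNum)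

-- mat_mult_vec: result[i] = (sum over j in range(len(A)) of A[i][j]*v[j]) % 26.
-- A[i][j] / v[j] are Python indexing; getD is exact for the in-range i, j that occur
-- (v[j] with j ≥ len(v) is an IndexError in Python — those inputs are outside Pre_).
def matMultVec (A : List (List Int)) (v : List Int) : List Int :=
  (List.range A.length).map (fun i =>
    PySem.Int.mod ((List.range A.length).foldl
      (fun acc j => acc + ((A.getD i []).getD j 0) * (v.getD j 0)) 0) 26)

-- [nums[i:i+n] for i in range(0, len(nums), n)]
def blocksOf (nums : List Int) (n : Int) : List (List Int) :=
  (PySem.List.pyRange 0 (nums.length : Int) n).map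
    (fun i => PySem.List.slice nums (some i) (some (i + n)))

-- the inner 'for p, ciph in zip(...)' loop with its break: all blocks must match
def validKey (pairs : List (List Int × List Int)) (key : List (List Int)) : Bool :=
  pairs.all (fun pc =>
    decide ((matMultVec key pc.1).map (fun x => PySem.Int.mod x 26)
            = pc.2.map (fun y => PySem.Int.mod y 26)))

-- the four nested 'for _ in range(26)' loops with early return
def loopD (pairs : List (List Int × List Int)) (a b c : Int) :
    List Int → Option (List (List Int))
  | [] => none
  | d :: ds =>
      if validKey pairs [[a, b], [c, d]] then some [[a, b], [c, d]]
      else loopD pairs a b c ds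

def loopC (pairs : List (List Int × List Int)) (a b : Int) :
    List Int → Option (List (List Int))
  | [] => none
  | c :: cs =>
      match loopD pairs a b c (PySem.List.pyRange 0 26 1) with
      | some k => some k
      | none => loopC pairs a b cs

def loopB (pairs : List (List Int × List Int)) (a : Int) :
    List Int → Option (List (List Int))
  | [] => none
  | b :: bs =>
      match loopC pairs a b (PySem.List.pyRange 0 26 1) with
      | some k => some k
      | none => loopB pairs a bs

def loopA (pairs : List (List Int × List Int)) :
    List Int → Option (List (List Int))
  | [] => none
  | a :: as_ =>
      match loopB pairs a (PySem.List.pyRange 0 26 1) with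
      | some k => some k
      | none => loopA pairs as_

def find_key_bruteforce (plaintext : String) (ciphertext : String) (n : Int) :
    Option (List (List Int)) :=
  let ptNums := textToNums plaintext
  let ctNums := textToNums ciphertext
  let pBlocks := blocksOf ptNums n
  let cBlocks := blocksOf ctNums n
  loopA (pBlocks.zip cBlocks) (PySem.List.pyRange 0 26 1)

-- ===== PORT B =====

-- len(c) == 2 and (a*p[0] + b*p[1]) % 26 == c[r] % 26
-- (p[0], p[1], c[r] via getD: exact under Pre_, where zipped plaintext blocks have
-- length ≥ 2 and c[r] is only consulted when len(c) == 2)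
def rowOk (pairs : List (List Int × List Int)) (r : Nat) (a b : Int) : Bool :=
  pairs.all (fun pc =>
    (pc.2.length == 2) &&
    (PySem.Int.mod (a * pc.1.getD 0 0 + b * pc.1.getD 1 0) 26
      == PySem.Int.mod (pc.2.getD r 0) 26))

-- find_row: for a in range(26): for b in range(26): if all(...): return [a, b]
def findRowB (pairs : List (List Int × List Int)) (r : Nat) (a : Int) :
    List Int → Option (List Int)
  | [] => none
  | b :: bs => if rowOk pairs r a b then some [a, b] else findRowB pairs r a bs

def findRowA (pairs : List (List Int × List Int)) (r : Nat) :
    List Int → Option (List Int)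
  | [] => none
  | a :: as_ =>
      match findRowB pairs r a (PySem.List.pyRange 0 26 1) with
      | some row => some row
      | none => findRowA pairs r as_

def findRow (pairs : List (List Int × List Int)) (r : Nat) : Option (List Int) :=
  findRowA pairs r (PySem.List.pyRange 0 26 1)

def find_key_bruteforce_alt (plaintext : String) (ciphertext : String) (n : Int) :
    Option (List (List Int)) :=
  let ptNums := (((PySem.Str.upper plaintext).toList.filter
      (fun c => PySem.Chars.isalpha c)).map
      (fun ch => ((PySem.Chars.upperChar ch).toNat : Int) - 65))
  let ctNums := (((PySem.Str.upper ciphertext).toList.filter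
      (fun c => PySem.Chars.isalpha c)).map
      (fun ch => ((PySem.Chars.upperChar ch).toNat : Int) - 65))
  let pairs := ((PySem.List.pyRange 0 (ptNums.length : Int) n).map
      (fun i => PySem.List.slice ptNums (some i) (some (i + n)))).zip
    ((PySem.List.pyRange 0 (ctNums.length : Int) n).map
      (fun i => PySem.List.slice ctNums (some i) (some (i + n))))
  match findRow pairs 0 with
  | none => none
  | some row0 =>
      match findRow pairs 1 with
      | none => none
      | some row1 => some [row0, row1]

-- ===== PRECONDITION & SPEC =====
-- Pre_ excludes n = 0 (range step 0 is a ValueError in A) and inputs where the zipped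
-- block lists contain a plaintext block shorter than 2, on most of which A's
-- mat_mult_vec raises IndexError; on the few such inputs where an earlier block is
-- unsatisfiable for every key A returns None before reaching the short block (and B
-- also returns None there), so Pre_ is slightly narrower than A's returning domain.
def Pre_find_key_bruteforce (plaintext : String) (ciphertext : String) (n : Int) : Prop :=
  let L : Int := (((PySem.Str.upper plaintext).toList.filter
      (fun c => PySem.Chars.isalpha c)).length : Int)
  let M : Int := (((PySem.Str.upper ciphertext).toList.filter
      (fun c => PySem.Chars.isalpha c)).length : Int)
  n < 0 ∨ (1 ≤ n ∧ (L = 0 ∨ M = 0 ∨ (2 ≤ n ∧ (PySem.Int.mod L n ≠ 1 ∨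
    PySem.Int.floordiv (M - 1) n < PySem.Int.floordiv (L - 1) n))))

instance (plaintext : String) (ciphertext : String) (n : Int) :
    Decidable (Pre_find_key_bruteforce plaintext ciphertext n) := by
  unfold Pre_find_key_bruteforce; infer_instance

def pvWitness_find_key_bruteforce : String × String × Int := ("HELP", "TEST", 2)

def Spec_find_key_bruteforce (plaintext : String) (ciphertext : String) (n : Int)
    (out : Option (List (List Int))) : Prop :=
  out = find_key_bruteforce_alt plaintext ciphertext n

instance (plaintext : String) (ciphertext : String) (n : Int)
    (out : Option (List (List Int))) :
    Decidable (Spec_find_key_bruteforce plaintext ciphertext n out) := by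
  unfold Spec_find_key_bruteforce; infer_instance

-- ===== CLAIM (what is proved, stated in full; the proofs are below) =====
def Claim_equal_find_key_bruteforce : Prop :=
  ∀ (plaintext : String) (ciphertext : String) (n : Int),
    Dom_find_key_bruteforce plaintext ciphertext n →
    Pre_find_key_bruteforce plaintext ciphertext n →
    Spec_find_key_bruteforce plaintext ciphertext n
      (find_key_bruteforce plaintext ciphertext n)

-- ===== LEMMAS AND PROOFS =====

-- per-pair decomposition: A's whole-block check for key [[a,b],[c,d]] is the
-- conjunction of B's row-0 check for (a,b) and row-1 check for (c,d)
theorem pair_decomp (a b c d : Int) (pc : List Int × List Int) :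
    decide ((matMultVec [[a, b], [c, d]] pc.1).map (fun x => PySem.Int.mod x 26)
            = pc.2.map (fun y => PySem.Int.mod y 26))
    = (((pc.2.length == 2) &&
        (PySem.Int.mod (a * pc.1.getD 0 0 + b * pc.1.getD 1 0) 26
          == PySem.Int.mod (pc.2.getD 0 0) 26)) &&
       ((pc.2.length == 2) &&
        (PySem.Int.mod (c * pc.1.getD 0 0 + d * pc.1.getD 1 0) 26
          == PySem.Int.mod (pc.2.getD 1 0) 26))) := by
  obtain ⟨p, cb⟩ := pc
  rcases cb with _ | ⟨x, _ | ⟨y, _ | ⟨z, rest⟩⟩⟩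
  · simp [matMultVec, List.range_succ]
  · simp [matMultVec, List.range_succ]
  · simp [matMultVec, List.range_succ]
    tauto
  · simp [matMultVec, List.range_succ]

theorem validKey_decomp (pairs : List (List Int × List Int)) (a b c d : Int) :
    validKey pairs [[a, b], [c, d]] = (rowOk pairs 0 a b && rowOk pairs 1 c d) := by
  induction pairs with
  | nil => rfl
  | cons pc pairs ih =>
    simp only [validKey, rowOk, List.all_cons] at ih ⊢
    rw [pair_decomp]
    cases ((pc.2.length == 2) &&
        (PySem.Int.mod (a * pc.1.getD 0 0 + b * pc.1.getD 1 0) 26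
          == PySem.Int.mod (pc.2.getD 0 0) 26)) <;>
      cases ((pc.2.length == 2) &&
        (PySem.Int.mod (c * pc.1.getD 0 0 + d * pc.1.getD 1 0) 26
          == PySem.Int.mod (pc.2.getD 1 0) 26)) <;>
      simp only [Bool.true_and, Bool.false_and, Bool.and_false, ih]

theorem loopD_eq (pairs : List (List Int × List Int)) (a b c : Int) (ds : List Int) :
    loopD pairs a b c ds =
      if rowOk pairs 0 a b then
        (findRowB pairs 1 c ds).map (fun r1 => [[a, b], r1])
      else none := by
  induction ds with
  | nil => simp [loopD, findRowB]
  | cons d ds ih =>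
    simp only [loopD, findRowB, validKey_decomp]
    by_cases h0 : rowOk pairs 0 a b <;> by_cases h1 : rowOk pairs 1 c d <;>
      simp [h0, h1, ih]

theorem loopC_eq (pairs : List (List Int × List Int)) (a b : Int) (cs : List Int) :
    loopC pairs a b cs =
      if rowOk pairs 0 a b then
        (findRowA pairs 1 cs).map (fun r1 => [[a, b], r1])
      else none := by
  induction cs with
  | nil => simp [loopC, findRowA]
  | cons c cs ih =>
    simp only [loopC, findRowA, loopD_eq]
    by_cases h0 : rowOk pairs 0 a b
    · simp only [h0, if_true]
      cases findRowB pairs 1 c (PySem.List.pyRange 0 26 1) <;>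
        simp [ih, h0]
    · simp [h0, ih]

theorem loopB_eq (pairs : List (List Int × List Int)) (a : Int) (bs : List Int) :
    loopB pairs a bs =
      match findRowB pairs 0 a bs, findRow pairs 1 with
      | some r0, some r1 => some [r0, r1]
      | _, _ => none := by
  induction bs with
  | nil =>
    cases findRow pairs 1 <;> rfl
  | cons b bs ih =>
    simp only [loopB, findRowB]
    rw [loopC_eq,
        show findRowA pairs 1 (PySem.List.pyRange 0 26 1) = findRow pairs 1 from rfl]
    by_cases h0 : rowOk pairs 0 a b
    · simp only [h0, if_true]
      cases h1 : findRow pairs 1 with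
      | none =>
        simp only [Option.map_none]
        rw [ih, h1]
        cases findRowB pairs 0 a bs <;> rfl
      | some r1 => rfl
    · simp only [h0, if_false, Bool.false_eq_true]
      exact ih

theorem loopA_eq (pairs : List (List Int × List Int)) (as_ : List Int) :
    loopA pairs as_ =
      match findRowA pairs 0 as_, findRow pairs 1 with
      | some r0, some r1 => some [r0, r1]
      | _, _ => none := by
  induction as_ with
  | nil => cases findRow pairs 1 <;> rfl
  | cons a as_ ih =>
    simp only [loopA, findRowA]
    rw [loopB_eq, ih]
    cases findRow pairs 1 <;>
      cases findRowB pairs 0 a (PySem.List.pyRange 0 26 1) <;>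
      cases findRowA pairs 0 as_ <;> rfl

-- ===== VERDICT (by name: the statement is the Claim_ definition above) =====
theorem loopA_top (pairs : List (List Int × List Int)) :
    loopA pairs (PySem.List.pyRange 0 26 1) =
      match findRow pairs 0 with
      | none => none
      | some r0 =>
          match findRow pairs 1 with
          | none => none
          | some r1 => some [r0, r1] := by
  rw [loopA_eq]
  show (match findRow pairs 0, findRow pairs 1 with
        | some r0, some r1 => some [r0, r1]
        | _, _ => none) = _
  cases findRow pairs 0 <;> cases findRow pairs 1 <;> rfl

theorem find_key_bruteforce_spec : Claim_equal_find_key_bruteforce := by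
  intro pt ct n _ _
  unfold Spec_find_key_bruteforce find_key_bruteforce find_key_bruteforce_alt
  unfold textToNums blocksOf charToNum
  exact loopA_top _
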